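-- pv_equiv track=rewrite | github.com/lerboi/x-automation | deviantart_master_processor.py | detect_char
-- ===== SOURCE A (Python) =====
-- CHAR_MAP = {
--     "a18": ("android18", "Android 18", "Dragon Ball"),
--     "akeno": ("akeno", "Akeno Himejima", "High School DxD"),
--     "albedo": ("albedo", "Albedo", "Overlord"),
--     "alice": ("alice", "Alice Midgar", "Eminence in Shadow"),
--     "anis": ("anis", "Anis", "Nikke"),
--     "annie": ("annie", "Annie Leonhart", "Attack on Titan"),
--     "ayaka": ("ayaka", "Kamisato Ayaka", "Genshin Impact"),
--     "boa": ("boa", "Boa Hancock", "One Piece"),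
--     "bulma": ("bulma", "Bulma", "Dragon Ball"),
--     "chichi": ("chichi", "Chi-Chi", "Dragon Ball"),
--     "chizuru": ("chizuru", "Chizuru Mizuhara", "Rent-a-Girlfriend"),
--     "darkness": ("darkness", "Darkness", "Konosuba"),
--     "ellen": ("ellen", "Ellen Joe", "ZZZ"),
--     "erza": ("erza", "Erza Scarlet", "Fairy Tail"),
--     "fern": ("fern", "Fern", "Frieren"),
--     "furina": ("furina", "Furina", "Genshin Impact"),
--     "ganyu": ("ganyu", "Ganyu", "Genshin Impact"),
--     "haruhime": ("haruhime", "Haruhime", "DanMachi"),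
--     "hestia": ("hestia", "Hestia", "DanMachi"),
--     "hinata": ("hinata", "Hinata Hyuga", "Naruto"),
--     "hutao": ("hutao", "Hu Tao", "Genshin Impact"),
--     "ino": ("ino", "Ino Yamanaka", "Naruto"),
--     "janedoe": ("jane", "Jane Doe", "ZZZ"),
--     "keqing": ("keqing", "Keqing", "Genshin Impact"),
--     "koneko": ("koneko", "Koneko Toujou", "High School DxD"),
--     "krista": ("krista", "Historia Reiss", "Attack on Titan"),
--     "kurumi": ("kurumi", "Kurumi Tokisaki", "Date A Live"),
--     "kurumii": ("kurumi", "Kurumi Tokisaki", "Date A Live"), # Typo in file list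
--     "maki": ("maki", "Maki Oze", "Fire Force"),
--     "makima": ("makima", "Makima", "Chainsaw Man"),
--     "marin": ("marin", "Marin Kitagawa", "My Dress-Up Darling"),
--     "mikasa": ("mikasa", "Mikasa Ackerman", "Attack on Titan"),
--     "miku": ("miku", "Hatsune Miku", "Vocaloid"),
--     "mimosa": ("mimosa", "Mimosa Vermillion", "Black Clover"),
--     "mitsuri": ("mitsuri", "Mitsuri Kanroji", "Demon Slayer"),
--     "miyabi": ("miyabi", "Hoshimi Miyabi", "ZZZ"),
--     "nami": ("nami", "Nami", "One Piece"),
--     "narberal": ("narberal", "Narberal Gamma", "Overlord"),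
--     "nicole": ("nicole", "Nicole Demara", "ZZZ"),
--     "notellee": ("noelle", "Noelle Silva", "Black Clover"),
--     "orihime": ("orihime", "Orihime Inoue", "Bleach"),
--     "raph": ("raph", "Raphtalia", "Shield Hero"),
--     "rias": ("rias", "Rias Gremory", "High School DxD"),
--     "rukia": ("rukia", "Rukia Kuchiki", "Bleach"),
--     "sakura": ("sakura", "Sakura Haruno", "Naruto"),
--     "ssakura": ("sakura", "Sakura Haruno", "Naruto"), # Typo in file list
--     "shinobu": ("shinobu", "Shinobu Kocho", "Demon Slayer"),
--     "tamaki": ("tamaki", "Tamaki Kotatsu", "Fire Force"),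
--     "tohka": ("tohka", "Tohka Yatogami", "Date A Live"),
--     "tsunade": ("tsunade", "Tsunade", "Naruto"),
--     "yor": ("yor", "Yor Forger", "Spy x Family"),
--     "zerotwo": ("zerotwo", "Zero Two", "Darling in the Franxx"),
--     "zhuyuan": ("zhuyuan", "Zhu Yuan", "ZZZ")
-- }
--
-- def detect_char(filename):
--     lower = filename.lower()
--     # Sort keys by length descending to fix "Maki" vs "Makima" and "Sakura" vs "SSakura"
--     sorted_keys = sorted(CHAR_MAP.keys(), key=len, reverse=True)
--
--     for key in sorted_keys:
--         if key in lower: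
--             db_entry = CHAR_MAP[key]
--             return db_entry[0], db_entry[1], db_entry[2]
--
--     return None, filename.split(".")[0].title(), "Anime"
-- ===== SOURCE B (Python) =====
-- _ROWS = [
--     "a18|android18|Android 18|Dragon Ball",
--     "akeno|akeno|Akeno Himejima|High School DxD",
--     "albedo|albedo|Albedo|Overlord",
--     "alice|alice|Alice Midgar|Eminence in Shadow",
--     "anis|anis|Anis|Nikke",
--     "annie|annie|Annie Leonhart|Attack on Titan",
--     "ayaka|ayaka|Kamisato Ayaka|Genshin Impact",
--     "boa|boa|Boa Hancock|One Piece",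
--     "bulma|bulma|Bulma|Dragon Ball",
--     "chichi|chichi|Chi-Chi|Dragon Ball",
--     "chizuru|chizuru|Chizuru Mizuhara|Rent-a-Girlfriend",
--     "darkness|darkness|Darkness|Konosuba",
--     "ellen|ellen|Ellen Joe|ZZZ",
--     "erza|erza|Erza Scarlet|Fairy Tail",
--     "fern|fern|Fern|Frieren",
--     "furina|furina|Furina|Genshin Impact",
--     "ganyu|ganyu|Ganyu|Genshin Impact",
--     "haruhime|haruhime|Haruhime|DanMachi",
--     "hestia|hestia|Hestia|DanMachi",
--     "hinata|hinata|Hinata Hyuga|Naruto",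
--     "hutao|hutao|Hu Tao|Genshin Impact",
--     "ino|ino|Ino Yamanaka|Naruto",
--     "janedoe|jane|Jane Doe|ZZZ",
--     "keqing|keqing|Keqing|Genshin Impact",
--     "koneko|koneko|Koneko Toujou|High School DxD",
--     "krista|krista|Historia Reiss|Attack on Titan",
--     "kurumi|kurumi|Kurumi Tokisaki|Date A Live",
--     "kurumii|kurumi|Kurumi Tokisaki|Date A Live",
--     "maki|maki|Maki Oze|Fire Force",
--     "makima|makima|Makima|Chainsaw Man",
--     "marin|marin|Marin Kitagawa|My Dress-Up Darling",
--     "mikasa|mikasa|Mikasa Ackerman|Attack on Titan",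
--     "miku|miku|Hatsune Miku|Vocaloid",
--     "mimosa|mimosa|Mimosa Vermillion|Black Clover",
--     "mitsuri|mitsuri|Mitsuri Kanroji|Demon Slayer",
--     "miyabi|miyabi|Hoshimi Miyabi|ZZZ",
--     "nami|nami|Nami|One Piece",
--     "narberal|narberal|Narberal Gamma|Overlord",
--     "nicole|nicole|Nicole Demara|ZZZ",
--     "notellee|noelle|Noelle Silva|Black Clover",
--     "orihime|orihime|Orihime Inoue|Bleach",
--     "raph|raph|Raphtalia|Shield Hero",
--     "rias|rias|Rias Gremory|High School DxD",
--     "rukia|rukia|Rukia Kuchiki|Bleach",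
--     "sakura|sakura|Sakura Haruno|Naruto",
--     "ssakura|sakura|Sakura Haruno|Naruto",
--     "shinobu|shinobu|Shinobu Kocho|Demon Slayer",
--     "tamaki|tamaki|Tamaki Kotatsu|Fire Force",
--     "tohka|tohka|Tohka Yatogami|Date A Live",
--     "tsunade|tsunade|Tsunade|Naruto",
--     "yor|yor|Yor Forger|Spy x Family",
--     "zerotwo|zerotwo|Zero Two|Darling in the Franxx",
--     "zhuyuan|zhuyuan|Zhu Yuan|ZZZ",
-- ]
--
-- # Each row: "key|slug|display name|series" (same order as the original CHAR_MAP).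
-- TABLE = [r.split("|") for r in _ROWS]
--
-- def detect_char(filename):
--     # Single pass over the rows in order, keeping the row with the strictly
--     # longest matching key (ties keep the earlier row) -- no sort, no dict.
--     lower = filename.lower()
--     best = None
--     for row in TABLE:
--         if row[0] in lower and (best is None or len(row[0]) > len(best[0])):
--             best = row
--     if best is not None:
--         return best[1], best[2], best[3]
--     return None, filename.split(".")[0].title(), "Anime"
-- ===== Notes on version B (the rewrite author's own statement) =====
-- stated objective: alternative
-- what changed: Replaces the dict plus sort-keys-by-descending-length-then-first-substring-match scan with a flat text-row table and a single pass in row order that keeps the row with the strictly longest matching key (ties keep the earlier row), eliminating the sort and the dict lookup.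
import Mathlib
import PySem

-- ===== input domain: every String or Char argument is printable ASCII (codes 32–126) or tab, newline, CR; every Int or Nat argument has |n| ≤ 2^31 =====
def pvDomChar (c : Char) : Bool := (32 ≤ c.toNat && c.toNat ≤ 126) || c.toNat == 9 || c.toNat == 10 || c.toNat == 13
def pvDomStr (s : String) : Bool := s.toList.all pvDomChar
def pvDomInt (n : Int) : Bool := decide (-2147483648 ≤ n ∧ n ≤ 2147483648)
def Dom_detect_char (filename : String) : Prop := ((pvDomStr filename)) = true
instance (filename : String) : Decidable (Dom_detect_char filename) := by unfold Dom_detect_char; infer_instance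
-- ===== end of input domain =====

-- B stores the character table as pipe-delimited text rows parsed into lists and does a
-- single unsorted pass keeping the row with the strictly longest matching key (objective:
-- alternative — no dict, no sort, one pass; same return value everywhere).

-- ===== PORT A =====
def CHAR_MAP : PySem.Dict String (String × String × String) := PySem.Dict.ofList [
  ("a18", ("android18", "Android 18", "Dragon Ball")),
  ("akeno", ("akeno", "Akeno Himejima", "High School DxD")),
  ("albedo", ("albedo", "Albedo", "Overlord")),
  ("alice", ("alice", "Alice Midgar", "Eminence in Shadow")),
  ("anis", ("anis", "Anis", "Nikke")),
  ("annie", ("annie", "Annie Leonhart", "Attack on Titan")),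
  ("ayaka", ("ayaka", "Kamisato Ayaka", "Genshin Impact")),
  ("boa", ("boa", "Boa Hancock", "One Piece")),
  ("bulma", ("bulma", "Bulma", "Dragon Ball")),
  ("chichi", ("chichi", "Chi-Chi", "Dragon Ball")),
  ("chizuru", ("chizuru", "Chizuru Mizuhara", "Rent-a-Girlfriend")),
  ("darkness", ("darkness", "Darkness", "Konosuba")),
  ("ellen", ("ellen", "Ellen Joe", "ZZZ")),
  ("erza", ("erza", "Erza Scarlet", "Fairy Tail")),
  ("fern", ("fern", "Fern", "Frieren")),
  ("furina", ("furina", "Furina", "Genshin Impact")),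
  ("ganyu", ("ganyu", "Ganyu", "Genshin Impact")),
  ("haruhime", ("haruhime", "Haruhime", "DanMachi")),
  ("hestia", ("hestia", "Hestia", "DanMachi")),
  ("hinata", ("hinata", "Hinata Hyuga", "Naruto")),
  ("hutao", ("hutao", "Hu Tao", "Genshin Impact")),
  ("ino", ("ino", "Ino Yamanaka", "Naruto")),
  ("janedoe", ("jane", "Jane Doe", "ZZZ")),
  ("keqing", ("keqing", "Keqing", "Genshin Impact")),
  ("koneko", ("koneko", "Koneko Toujou", "High School DxD")),
  ("krista", ("krista", "Historia Reiss", "Attack on Titan")),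
  ("kurumi", ("kurumi", "Kurumi Tokisaki", "Date A Live")),
  ("kurumii", ("kurumi", "Kurumi Tokisaki", "Date A Live")),
  ("maki", ("maki", "Maki Oze", "Fire Force")),
  ("makima", ("makima", "Makima", "Chainsaw Man")),
  ("marin", ("marin", "Marin Kitagawa", "My Dress-Up Darling")),
  ("mikasa", ("mikasa", "Mikasa Ackerman", "Attack on Titan")),
  ("miku", ("miku", "Hatsune Miku", "Vocaloid")),
  ("mimosa", ("mimosa", "Mimosa Vermillion", "Black Clover")),
  ("mitsuri", ("mitsuri", "Mitsuri Kanroji", "Demon Slayer")),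
  ("miyabi", ("miyabi", "Hoshimi Miyabi", "ZZZ")),
  ("nami", ("nami", "Nami", "One Piece")),
  ("narberal", ("narberal", "Narberal Gamma", "Overlord")),
  ("nicole", ("nicole", "Nicole Demara", "ZZZ")),
  ("notellee", ("noelle", "Noelle Silva", "Black Clover")),
  ("orihime", ("orihime", "Orihime Inoue", "Bleach")),
  ("raph", ("raph", "Raphtalia", "Shield Hero")),
  ("rias", ("rias", "Rias Gremory", "High School DxD")),
  ("rukia", ("rukia", "Rukia Kuchiki", "Bleach")),
  ("sakura", ("sakura", "Sakura Haruno", "Naruto")),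
  ("ssakura", ("sakura", "Sakura Haruno", "Naruto")),
  ("shinobu", ("shinobu", "Shinobu Kocho", "Demon Slayer")),
  ("tamaki", ("tamaki", "Tamaki Kotatsu", "Fire Force")),
  ("tohka", ("tohka", "Tohka Yatogami", "Date A Live")),
  ("tsunade", ("tsunade", "Tsunade", "Naruto")),
  ("yor", ("yor", "Yor Forger", "Spy x Family")),
  ("zerotwo", ("zerotwo", "Zero Two", "Darling in the Franxx")),
  ("zhuyuan", ("zhuyuan", "Zhu Yuan", "ZZZ"))
]

-- hand port of str.title() (no PySem primitive): exact on ASCII, where a character is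
-- cased iff it is a letter — uppercase a letter after a non-letter, lowercase otherwise.
def pyTitleAux : Bool → List Char → List Char
  | _, [] => []
  | prev, c :: cs =>
    if PySem.Chars.isalpha c then
      (if prev then PySem.Chars.lowerChar c else PySem.Chars.upperChar c) :: pyTitleAux true cs
    else c :: pyTitleAux false cs

def pyTitle (s : String) : String := String.mk (pyTitleAux false s.toList)

-- `return None, filename.split(".")[0].title(), "Anime"` (sep "." is nonempty and
-- split always yields a nonempty list, so the getD/headD defaults are unreachable)
def pyDefault (filename : String) : Option String × String × String :=
  (none, pyTitle (((PySem.Str.split? filename ".").getD []).headD ""), "Anime")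

-- `db_entry = CHAR_MAP[key]; return db_entry[0], db_entry[1], db_entry[2]`
-- (the none branch is Python's KeyError, unreachable: key is drawn from CHAR_MAP's keys)
def lookupEntry (k : String) : Option String × String × String :=
  match CHAR_MAP.get? k with
  | some e => (some e.1, e.2.1, e.2.2)
  | none => (none, "", "")

-- A's `for key in sorted_keys: if key in lower: return ...` — first matching key
def detect_char_loop (lower : String) : List String → Option String
  | [] => none
  | k :: rest => if PySem.Str.isIn k lower then some k else detect_char_loop lower rest

def detect_char (filename : String) : Option String × String × String :=
  let lower := PySem.Str.lower filename
  let sorted_keys := PySem.List.sorted CHAR_MAP.keys PySem.Str.len true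
  match detect_char_loop lower sorted_keys with
  | some key => lookupEntry key
  | none => pyDefault filename

-- ===== PORT B =====
-- B's data: one "key|slug|name|series" text row per character (Source B's _ROWS literal)
def ROWS : List String := [
  "a18|android18|Android 18|Dragon Ball",
  "akeno|akeno|Akeno Himejima|High School DxD",
  "albedo|albedo|Albedo|Overlord",
  "alice|alice|Alice Midgar|Eminence in Shadow",
  "anis|anis|Anis|Nikke",
  "annie|annie|Annie Leonhart|Attack on Titan",
  "ayaka|ayaka|Kamisato Ayaka|Genshin Impact",
  "boa|boa|Boa Hancock|One Piece",
  "bulma|bulma|Bulma|Dragon Ball",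
  "chichi|chichi|Chi-Chi|Dragon Ball",
  "chizuru|chizuru|Chizuru Mizuhara|Rent-a-Girlfriend",
  "darkness|darkness|Darkness|Konosuba",
  "ellen|ellen|Ellen Joe|ZZZ",
  "erza|erza|Erza Scarlet|Fairy Tail",
  "fern|fern|Fern|Frieren",
  "furina|furina|Furina|Genshin Impact",
  "ganyu|ganyu|Ganyu|Genshin Impact",
  "haruhime|haruhime|Haruhime|DanMachi",
  "hestia|hestia|Hestia|DanMachi",
  "hinata|hinata|Hinata Hyuga|Naruto",
  "hutao|hutao|Hu Tao|Genshin Impact",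
  "ino|ino|Ino Yamanaka|Naruto",
  "janedoe|jane|Jane Doe|ZZZ",
  "keqing|keqing|Keqing|Genshin Impact",
  "koneko|koneko|Koneko Toujou|High School DxD",
  "krista|krista|Historia Reiss|Attack on Titan",
  "kurumi|kurumi|Kurumi Tokisaki|Date A Live",
  "kurumii|kurumi|Kurumi Tokisaki|Date A Live",
  "maki|maki|Maki Oze|Fire Force",
  "makima|makima|Makima|Chainsaw Man",
  "marin|marin|Marin Kitagawa|My Dress-Up Darling",
  "mikasa|mikasa|Mikasa Ackerman|Attack on Titan",
  "miku|miku|Hatsune Miku|Vocaloid",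
  "mimosa|mimosa|Mimosa Vermillion|Black Clover",
  "mitsuri|mitsuri|Mitsuri Kanroji|Demon Slayer",
  "miyabi|miyabi|Hoshimi Miyabi|ZZZ",
  "nami|nami|Nami|One Piece",
  "narberal|narberal|Narberal Gamma|Overlord",
  "nicole|nicole|Nicole Demara|ZZZ",
  "notellee|noelle|Noelle Silva|Black Clover",
  "orihime|orihime|Orihime Inoue|Bleach",
  "raph|raph|Raphtalia|Shield Hero",
  "rias|rias|Rias Gremory|High School DxD",
  "rukia|rukia|Rukia Kuchiki|Bleach",
  "sakura|sakura|Sakura Haruno|Naruto",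
  "ssakura|sakura|Sakura Haruno|Naruto",
  "shinobu|shinobu|Shinobu Kocho|Demon Slayer",
  "tamaki|tamaki|Tamaki Kotatsu|Fire Force",
  "tohka|tohka|Tohka Yatogami|Date A Live",
  "tsunade|tsunade|Tsunade|Naruto",
  "yor|yor|Yor Forger|Spy x Family",
  "zerotwo|zerotwo|Zero Two|Darling in the Franxx",
  "zhuyuan|zhuyuan|Zhu Yuan|ZZZ"]

-- `TABLE = [r.split("|") for r in _ROWS]` ("|" is nonempty, so split? never returns none)
def TABLE : List (List String) := ROWS.map (fun r => (PySem.Str.split? r "|").getD [])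

-- `row[0]` / `best[0]` (every row of the well-formed table is nonempty, default unreachable)
def rowKey (r : List String) : String := (PySem.List.pyGet? r 0).getD ""

-- B's port of str.title(): a left fold carrying (previous-char-cased, reversed output)
def titleStep (st : Bool × List Char) (c : Char) : Bool × List Char :=
  if PySem.Chars.isalpha c then
    (true, (if st.1 then PySem.Chars.lowerChar c else PySem.Chars.upperChar c) :: st.2)
  else (false, c :: st.2)

def titleB (s : String) : String :=
  String.mk ((s.toList.foldl titleStep (false, [])).2.reverse)

def detect_char_alt (filename : String) : Option String × String × String :=
  let lower := PySem.Str.lower filename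
  let best := TABLE.foldl
    (fun best row =>
      if PySem.Str.isIn (rowKey row) lower &&
          (best.isNone || decide (PySem.Str.len (rowKey (best.getD [])) < PySem.Str.len (rowKey row)))
      then some row else best) none
  match best with
  | some row =>
      (some ((PySem.List.pyGet? row 1).getD ""), (PySem.List.pyGet? row 2).getD "",
        (PySem.List.pyGet? row 3).getD "")
  | none => (none, titleB (((PySem.Str.split? filename ".").getD []).headD ""), "Anime")

-- ===== PRECONDITION & SPEC =====
def Spec_detect_char (filename : String) (out : Option String × String × String) : Prop := out = detect_char_alt filename
instance (filename : String) (out : Option String × String × String) : Decidable (Spec_detect_char filename out) := by unfold Spec_detect_char; infer_instance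

-- ===== CLAIM (what is proved, stated in full; the proofs are below) =====
def Claim_equal_detect_char : Prop := ∀ (filename : String), Dom_detect_char filename → Spec_detect_char filename (detect_char filename)

-- ===== LEMMAS AND PROOFS =====

-- Generic development over an opaque match predicate f and weight w (instantiated with
-- substring-of-lower and key length): stable descending insertion sort vs one-pass best.

def insG {α κ : Type} [LinearOrder κ] (w : α → κ) (k : α) : List α → List α
  | [] => [k]
  | b :: S => if w k < w b then b :: insG w k S else k :: b :: S

def isortG {α κ : Type} [LinearOrder κ] (w : α → κ) : List α → List α
  | [] => []
  | k :: L => insG w k (isortG w L)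

def stepG {α κ : Type} [LinearOrder κ] (f : α → Bool) (w : α → κ) (k : α) : Option α → Option α
  | none => if f k then some k else none
  | some b => if f k && decide (w b ≤ w k) then some k else some b

def bestG {α κ : Type} [LinearOrder κ] (f : α → Bool) (w : α → κ) : List α → Option α
  | [] => none
  | k :: L => stepG f w k (bestG f w L)

def chooseG {α κ : Type} [LinearOrder κ] (w : α → κ) : Option α → Option α → Option α
  | acc, none => acc
  | none, some r => some r
  | some a, some r => if w a < w r then some r else some a

theorem insG_perm {α κ : Type} [LinearOrder κ] (w : α → κ) (k : α) (S : List α) :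
    (insG w k S).Perm (k :: S) := by
  induction S with
  | nil => exact List.Perm.refl _
  | cons b S ih =>
    by_cases hc : w k < w b
    · simp only [insG, if_pos hc]
      exact (ih.cons b).trans (List.Perm.swap k b S)
    · simp only [insG, if_neg hc]
      exact List.Perm.refl _

theorem insG_pairwise {α κ : Type} [LinearOrder κ] (w : α → κ) (k : α) (S : List α)
    (h : S.Pairwise (fun a b => w b ≤ w a)) :
    (insG w k S).Pairwise (fun a b => w b ≤ w a) := by
  induction S with
  | nil => simp [insG]
  | cons b S ih =>
    rcases List.pairwise_cons.mp h with ⟨hb, hS⟩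
    by_cases hc : w k < w b
    · simp only [insG, if_pos hc]
      refine List.pairwise_cons.mpr ⟨?_, ih hS⟩
      intro x hx
      have hx' : x ∈ k :: S := (insG_perm w k S).mem_iff.mp hx
      rcases List.mem_cons.mp hx' with rfl | hxS
      · exact le_of_lt hc
      · exact hb x hxS
    · simp only [insG, if_neg hc]
      have hc' : w b ≤ w k := le_of_not_gt hc
      refine List.pairwise_cons.mpr ⟨?_, h⟩
      intro x hx
      rcases List.mem_cons.mp hx with rfl | hxS
      · exact hc'
      · exact le_trans (hb x hxS) hc'

theorem isortG_pairwise {α κ : Type} [LinearOrder κ] (w : α → κ) (L : List α) :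
    (isortG w L).Pairwise (fun a b => w b ≤ w a) := by
  induction L with
  | nil => simp [isortG]
  | cons k L ih => exact insG_pairwise w k _ ih

theorem stepG_of_false {α κ : Type} [LinearOrder κ] (f : α → Bool) (w : α → κ) (k : α)
    (h : f k = false) (o : Option α) : stepG f w k o = o := by
  cases o <;> simp [stepG, h]

theorem find?_insG {α κ : Type} [LinearOrder κ] (f : α → Bool) (w : α → κ) (k : α) (S : List α)
    (h : S.Pairwise (fun a b => w b ≤ w a)) :
    (insG w k S).find? f = stepG f w k (S.find? f) := by
  induction S with
  | nil => cases hf : f k <;> simp [insG, stepG, List.find?, hf]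
  | cons b S ih =>
    rcases List.pairwise_cons.mp h with ⟨hb, hS⟩
    by_cases hc : w k < w b
    · rw [insG, if_pos hc]
      cases hfb : f b
      · rw [List.find?_cons_of_neg (by simp [hfb]), List.find?_cons_of_neg (by simp [hfb])]
        exact ih hS
      · rw [List.find?_cons_of_pos (by simp [hfb]), List.find?_cons_of_pos (by simp [hfb])]
        have hnb : ¬ (f k && decide (w b ≤ w k)) = true := by
          simp [decide_eq_false (not_le.mpr hc)]
        simp only [stepG, if_neg hnb]
    · rw [insG, if_neg hc]
      have hc' : w b ≤ w k := le_of_not_gt hc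
      cases hfk : f k
      · rw [List.find?_cons_of_neg (by simp [hfk]), stepG_of_false f w k hfk]
      · rw [List.find?_cons_of_pos (by simp [hfk])]
        cases hr : List.find? f (b :: S) with
        | none => simp [stepG, hfk]
        | some c =>
          have hcmem : c ∈ b :: S := List.mem_of_find?_eq_some hr
          have hcle : w c ≤ w k := by
            rcases List.mem_cons.mp hcmem with rfl | hcS
            · exact hc'
            · exact le_trans (hb c hcS) hc'
          have hyes : (f k && decide (w c ≤ w k)) = true := by
            simp [hfk, decide_eq_true hcle]
          simp only [stepG, if_pos hyes]

theorem find?_isortG {α κ : Type} [LinearOrder κ] (f : α → Bool) (w : α → κ) (L : List α) :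
    (isortG w L).find? f = bestG f w L := by
  induction L with
  | nil => rfl
  | cons k L ih =>
    simp only [isortG, bestG, find?_insG f w k _ (isortG_pairwise w L), ih]

theorem bestG_map {α β κ : Type} [LinearOrder κ] (f : β → Bool) (w : β → κ) (h : α → β)
    (L : List α) :
    bestG f w (L.map h) = (bestG (fun x => f (h x)) (fun x => w (h x)) L).map h := by
  induction L with
  | nil => rfl
  | cons r L ih =>
    simp only [List.map, bestG, ih]
    cases hb : bestG (fun x => f (h x)) (fun x => w (h x)) L with
    | none =>
      simp only [Option.map_none, stepG]
      by_cases hg : f (h r) = true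
      · rw [if_pos hg, if_pos hg]; rfl
      · rw [if_neg hg, if_neg hg]; rfl
    | some b =>
      simp only [Option.map_some, stepG]
      by_cases hcond : (f (h r) && decide (w (h b) ≤ w (h r))) = true
      · rw [if_pos hcond, if_pos hcond]; rfl
      · rw [if_neg hcond, if_neg hcond]; rfl

theorem bestG_mem {α κ : Type} [LinearOrder κ] (f : α → Bool) (w : α → κ) (L : List α)
    (r : α) (h : bestG f w L = some r) : r ∈ L := by
  induction L with
  | nil => simp [bestG] at h
  | cons a L ih =>
    rw [bestG] at h
    cases hb : bestG f w L with
    | none =>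
      rw [hb] at h
      simp only [stepG] at h
      split_ifs at h
      simp only [Option.some.injEq] at h
      subst h
      exact List.mem_cons_self
    | some b =>
      rw [hb] at h
      simp only [stepG] at h
      split_ifs at h <;> simp only [Option.some.injEq] at h
      · subst h
        exact List.mem_cons_self
      · subst h
        exact List.mem_cons_of_mem a (ih hb)

theorem chooseG_none {α κ : Type} [LinearOrder κ] (w : α → κ) (r : Option α) :
    chooseG w none r = r := by
  cases r <;> rfl

theorem foldl_bestG {α κ : Type} [LinearOrder κ] (f : α → Bool) (w : α → κ) (d : α)
    (L : List α) (acc : Option α) :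
    L.foldl (fun best k =>
        if f k && (best.isNone || decide (w (best.getD d) < w k)) then some k else best) acc
      = chooseG w acc (bestG f w L) := by
  induction L generalizing acc with
  | nil => cases acc <;> rfl
  | cons k L ih =>
    rw [List.foldl_cons, ih, show bestG f w (k :: L) = stepG f w k (bestG f w L) from rfl]
    by_cases hfk : f k = true
    · cases acc with
      | none =>
        rw [if_pos (by simp [hfk]), chooseG_none]
        cases hr : bestG f w L with
        | none => simp [stepG, chooseG, hfk]
        | some b =>
          simp only [stepG]
          by_cases hbk : w b ≤ w k
          · rw [if_pos (by simp [hfk, hbk])]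
            simp [chooseG, not_lt.mpr hbk]
          · rw [if_neg (by simp [hfk, hbk])]
            simp [chooseG, lt_of_not_ge hbk]
      | some a =>
        simp only [Option.isNone_some, Option.getD_some, Bool.false_or]
        by_cases hak : w a < w k
        · rw [if_pos (by simp [hfk, hak])]
          cases hr : bestG f w L with
          | none => simp [stepG, chooseG, hfk, hak]
          | some b =>
            simp only [stepG]
            by_cases hbk : w b ≤ w k
            · rw [if_pos (by simp [hfk, hbk])]
              simp [chooseG, hak, not_lt.mpr hbk]
            · rw [if_neg (by simp [hfk, hbk])]
              have hkb : w k < w b := lt_of_not_ge hbk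
              simp [chooseG, hkb, lt_trans hak hkb]
        · rw [if_neg (by simp [hfk, hak])]
          cases hr : bestG f w L with
          | none => simp [stepG, chooseG, hfk, hak]
          | some b =>
            simp only [stepG]
            by_cases hbk : w b ≤ w k
            · rw [if_pos (by simp [hfk, hbk])]
              have hab : ¬ w a < w b := fun hh => hak (lt_of_lt_of_le hh hbk)
              simp [chooseG, hab, hak]
            · rw [if_neg (by simp [hfk, hbk])]
    · have hfk' : f k = false := by simpa using hfk
      rw [if_neg (by simp [hfk']), stepG_of_false f w k hfk']

-- A's explicit loop is List.find?
theorem loop_eq_find? (lower : String) (L : List String) :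
    detect_char_loop lower L = L.find? (fun k => PySem.Str.isIn k lower) := by
  induction L with
  | nil => rfl
  | cons k rest ih =>
    by_cases h : PySem.Str.isIn k lower = true
    · rw [List.find?_cons_of_pos (p := fun s => PySem.Str.isIn s lower) h]
      simp only [detect_char_loop, if_pos h]
    · rw [List.find?_cons_of_neg (p := fun s => PySem.Str.isIn s lower) (by simpa using h)]
      simp only [detect_char_loop, if_neg h, ih]

-- the foldl form of B's title equals A's recursive form
theorem titleStep_foldl (l : List Char) (p : Bool) (acc : List Char) :
    (l.foldl titleStep (p, acc)).2 = (pyTitleAux p l).reverse ++ acc := by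
  induction l generalizing p acc with
  | nil => simp [pyTitleAux]
  | cons c cs ih =>
    by_cases h : PySem.Chars.isalpha c = true
    · simp [List.foldl, titleStep, h, pyTitleAux, ih]
    · simp [List.foldl, titleStep, h, pyTitleAux, ih]

theorem titleB_eq (s : String) : titleB s = pyTitle s := by
  simp [titleB, pyTitle, titleStep_foldl]

-- the two constant data representations agree (closed facts, checked by the kernel)
set_option maxRecDepth 100000 in
set_option maxHeartbeats 4000000 in
theorem sorted_keys_eq :
    PySem.List.sorted CHAR_MAP.keys PySem.Str.len true = isortG PySem.Str.len (TABLE.map rowKey) := by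
  decide

set_option maxRecDepth 100000 in
set_option maxHeartbeats 4000000 in
theorem table_rows_lookup : ∀ r ∈ TABLE,
    (some ((PySem.List.pyGet? r 1).getD ""), (PySem.List.pyGet? r 2).getD "",
      (PySem.List.pyGet? r 3).getD "") = lookupEntry (rowKey r) := by
  decide

-- ===== VERDICT (by name: the statement is the Claim_ definition above) =====
theorem detect_char_spec : Claim_equal_detect_char := by
  intro filename _
  unfold Spec_detect_char detect_char detect_char_alt
  dsimp only
  rw [loop_eq_find?, sorted_keys_eq, find?_isortG,
    bestG_map (fun k => PySem.Str.isIn k (PySem.Str.lower filename)) PySem.Str.len rowKey TABLE,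
    foldl_bestG (fun r => PySem.Str.isIn (rowKey r) (PySem.Str.lower filename))
      (fun r => PySem.Str.len (rowKey r)) ([] : List String) TABLE none, chooseG_none]
  cases hr : bestG (fun r => PySem.Str.isIn (rowKey r) (PySem.Str.lower filename))
      (fun r => PySem.Str.len (rowKey r)) TABLE with
  | none => simp [pyDefault, titleB_eq]
  | some r =>
    simp only [Option.map_some]
    exact (table_rows_lookup r (bestG_mem _ _ _ _ hr)).symm
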